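-- pv_equiv track=rewrite | github.com/lucas-romanenko/jellyfin-tentacle | tentacle/services/smartlists.py | _classify_conditions
-- ===== SOURCE A (Python) =====
-- NATIVE_FIELDS = {"genre", "rating", "year"}
--
-- def _classify_conditions(conditions: list) -> str:
--     """Classify tag rule conditions as 'native' (can query Jellyfin directly),
--     'tentacle' (requires Tentacle tags), or 'mixed'."""
--     if not conditions:
--         return "tentacle"
--     fields = {c.get("field", "") for c in conditions}
--     if fields <= NATIVE_FIELDS:
--         return "native"
--     if fields.isdisjoint(NATIVE_FIELDS):
--         return "tentacle"
--     return "mixed"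
-- ===== SOURCE B (Python) =====
-- NATIVE_FIELDS = {"genre", "rating", "year"}
--
-- def _classify_conditions(conditions: list) -> str:
--     """Classify tag rule conditions as 'native', 'tentacle', or 'mixed'."""
--     if not conditions:
--         return "tentacle"
--     first_native = conditions[0].get("field", "") in NATIVE_FIELDS
--     for c in conditions[1:]:
--         if (c.get("field", "") in NATIVE_FIELDS) != first_native:
--             return "mixed"
--     return "native" if first_native else "tentacle"
-- ===== Notes on version B (the rewrite author's own statement) =====
-- stated objective: alternative
-- what changed: Instead of materializing the field set and running subset/disjoint tests, B classifies only the first condition and scans the remainder with an early exit: the first condition of the opposite class returns 'mixed' immediately, otherwise the first element's class decides.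
import Mathlib
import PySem

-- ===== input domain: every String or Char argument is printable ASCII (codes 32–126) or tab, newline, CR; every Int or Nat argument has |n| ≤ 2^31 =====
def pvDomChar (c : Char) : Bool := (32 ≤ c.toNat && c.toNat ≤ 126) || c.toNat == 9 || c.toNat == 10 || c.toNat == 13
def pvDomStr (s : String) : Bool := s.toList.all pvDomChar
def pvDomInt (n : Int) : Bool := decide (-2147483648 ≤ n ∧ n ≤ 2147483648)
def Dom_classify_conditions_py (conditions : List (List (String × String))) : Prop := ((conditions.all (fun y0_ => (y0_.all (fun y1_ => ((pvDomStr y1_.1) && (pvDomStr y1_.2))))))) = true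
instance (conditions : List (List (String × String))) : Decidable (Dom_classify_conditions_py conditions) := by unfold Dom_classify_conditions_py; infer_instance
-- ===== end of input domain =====

-- B drops the field set and its subset/disjoint tests: it classifies the first
-- condition, then scans the rest with an early exit returning "mixed" at the first
-- condition of the opposite class; objective: alternative.

-- ===== PORT A =====
def NATIVE_FIELDS : PySem.Set String := PySem.Set.ofList ["genre", "rating", "year"]

def classify_conditions_py (conditions : List (List (String × String))) : String :=
  if conditions = [] then "tentacle"
  else
    let fields : PySem.Set String :=
      PySem.Set.ofList (conditions.map (fun c => PySem.Dict.getD (PySem.Dict.mk c) "field" ""))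
    if PySem.Set.issubset fields NATIVE_FIELDS then "native"
    else if PySem.Set.isdisjoint fields NATIVE_FIELDS then "tentacle"
    else "mixed"

-- ===== PORT B =====
-- 'c.get("field", "") in NATIVE_FIELDS' for one condition
def isNativeCond (c : List (String × String)) : Bool :=
  PySem.Set.contains NATIVE_FIELDS (PySem.Dict.getD (PySem.Dict.mk c) "field" "")

-- the early-exit loop over conditions[1:]
def scanRest (firstNative : Bool) : List (List (String × String)) → String
  | [] => if firstNative then "native" else "tentacle"
  | c :: rest => if isNativeCond c != firstNative then "mixed" else scanRest firstNative rest

def classify_conditions_py_alt (conditions : List (List (String × String))) : String :=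
  match conditions with
  | [] => "tentacle"
  | c0 :: rest => scanRest (isNativeCond c0) rest

-- ===== PRECONDITION & SPEC =====
def Spec_classify_conditions_py (conditions : List (List (String × String))) (out : String) : Prop := out = classify_conditions_py_alt conditions
instance (conditions : List (List (String × String))) (out : String) : Decidable (Spec_classify_conditions_py conditions out) := by unfold Spec_classify_conditions_py; infer_instance

-- ===== CLAIM (what is proved, stated in full; the proofs are below) =====
def Claim_equal_classify_conditions_py : Prop := ∀ (conditions : List (List (String × String))), Dom_classify_conditions_py conditions → Spec_classify_conditions_py conditions (classify_conditions_py conditions)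

-- ===== LEMMAS AND PROOFS =====

-- B's early-exit scan, characterised: "mixed" iff some element has the opposite class.
theorem scanRest_eq (fn : Bool) (l : List (List (String × String))) :
    scanRest fn l
      = if l.any (fun c => isNativeCond c != fn) then "mixed"
        else if fn then "native" else "tentacle" := by
  induction l with
  | nil => simp [scanRest]
  | cons c rest ih =>
    by_cases h : (isNativeCond c != fn) = true <;> simp [scanRest, h, ih]

theorem issubset_ofList_iff (xs t : List String) :
    PySem.Set.issubset (PySem.Set.ofList xs) t = xs.all (fun x => PySem.Set.contains t x) := by
  rcases h : PySem.Set.issubset (PySem.Set.ofList xs) t with _ | _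
  · symm
    rw [Bool.eq_false_iff]
    intro hall
    rw [← Bool.not_eq_true, PySem.Set.issubset_iff] at h
    apply h
    intro x hx
    rw [PySem.Set.mem_ofList] at hx
    have := List.all_eq_true.mp hall x hx
    simpa [PySem.Set.contains] using this
  · symm
    rw [PySem.Set.issubset_iff] at h
    rw [List.all_eq_true]
    intro x hx
    have := h x (by rw [PySem.Set.mem_ofList]; exact hx)
    simpa [PySem.Set.contains] using this

theorem isdisjoint_ofList_iff (xs t : List String) :
    PySem.Set.isdisjoint (PySem.Set.ofList xs) t = xs.all (fun x => !PySem.Set.contains t x) := by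
  rcases h : PySem.Set.isdisjoint (PySem.Set.ofList xs) t with _ | _
  · symm
    rw [Bool.eq_false_iff]
    intro hall
    rw [← Bool.not_eq_true, PySem.Set.isdisjoint_iff] at h
    apply h
    intro x hx
    rw [PySem.Set.mem_ofList] at hx
    have := List.all_eq_true.mp hall x hx
    simpa [PySem.Set.contains] using this
  · symm
    rw [PySem.Set.isdisjoint_iff] at h
    rw [List.all_eq_true]
    intro x hx
    have := h x (by rw [PySem.Set.mem_ofList]; exact hx)
    simpa [PySem.Set.contains] using this

-- the three-way branch on (first class, flags), stated over Bools
theorem key (b0 : Bool) (rest : List (List (String × String))) :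
    (if (b0 && rest.all (fun c => isNativeCond c)) = true then "native"
     else if (!b0 && rest.all (fun c => !isNativeCond c)) = true then "tentacle"
     else "mixed")
    = (if rest.any (fun c => isNativeCond c != b0) = true then "mixed"
       else if b0 then "native" else "tentacle") := by
  cases b0 <;> induction rest with
  | nil => simp
  | cons c t ih => cases h : isNativeCond c <;> simp_all

-- ===== VERDICT (by name: the statement is the Claim_ definition above) =====
theorem classify_conditions_py_spec : Claim_equal_classify_conditions_py := by
  intro conditions _
  unfold Spec_classify_conditions_py classify_conditions_py classify_conditions_py_alt
  rcases conditions with _ | ⟨c0, rest⟩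
  · simp
  · simp only [reduceCtorEq, if_false, List.map_cons,
      issubset_ofList_iff, isdisjoint_ofList_iff, scanRest_eq,
      List.all_cons, List.all_map, Function.comp_def, Bool.not_eq_true']
    exact (key (isNativeCond c0) rest).symm ▸ rfl
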